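-- pv_equiv track=rewrite | github.com/HackXIt/REIL-hex-game | src/reil_hex_game/agents/rule_based_helper.py | make_own_bridge
-- ===== SOURCE A (Python) =====
-- from typing import List, Tuple, Dict, Callable, Set, Optional
--
-- Coordinate = Tuple[int, int]
--
-- def make_own_bridge(board: List[List[int]], action_set: List[Coordinate], player: int) -> Coordinate | None:
--     size = len(board)
--     center = size // 2
--
--     # Offsets, ordered by preference: first directional, then basic
--     if player == 1:  # White (horizontal)
--         offsets = [(1, -2), (-1, 2), (-1, -1), (1, 1)]
--         axis = 1
--     else:  # Black (vertical)
--         offsets = [(2, -1), (-2, 1), (-1, -1), (1, 1)]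
--         axis = 0
--
--     candidates = []
--
--     for x in range(size):
--         for y in range(size):
--             if board[x][y] != player:
--                 continue
--             for dx, dy in offsets:
--                 bx, by = x + dx, y + dy
--                 gx, gy = x + dx // 2, y + dy // 2  # the one gap
--
--                 if (
--                     (bx, by) in action_set
--                     and board[bx][by] == 0
--                     and 0 <= gx < size and 0 <= gy < size
--                     and board[gx][gy] == 0
--                 ):
--                     candidates.append(((bx, by), dx, dy))
--
--     if not candidates:
--         return None
--
--     # Separate directional vs basic bridges
--     directional = [c for c in candidates if abs(c[1]) + abs(c[2]) > 2]
--     basic = [c for c in candidates if abs(c[1]) + abs(c[2]) <= 2]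
--
--     def pick_best(group):
--         # pick closest to center line along winning axis
--         return min(group, key=lambda c: abs(c[0][axis] - center))[0]
--
--     if directional:
--         return pick_best(directional)
--     else:
--         return pick_best(basic)
-- ===== SOURCE B (Python) =====
-- def make_own_bridge(board, action_set, player):
--     # Candidate-driven scan: iterate over action_set targets and invert the offsets,
--     # keeping one running lexicographic best (tier, dist, x, y, i) instead of scanning the board.
--     size = len(board)
--     center = size // 2
--     if player == 1:  # White (horizontal)
--         offsets = [(1, -2), (-1, 2), (-1, -1), (1, 1)]
--         axis = 1
--     else:  # Black (vertical)
--         offsets = [(2, -1), (-2, 1), (-1, -1), (1, 1)]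
--         axis = 0
--     best = None  # (key, target); key uniquely identifies the (stone, offset) pair
--     for bx, by in action_set:
--         for i, (dx, dy) in enumerate(offsets):
--             x, y = bx - dx, by - dy
--             if not (0 <= x < size and 0 <= y < size and board[x][y] == player):
--                 continue
--             gx, gy = x + dx // 2, y + dy // 2
--             if (board[bx][by] == 0 and 0 <= gx < size and 0 <= gy < size
--                     and board[gx][gy] == 0):
--                 key = (0 if abs(dx) + abs(dy) > 2 else 1,
--                        abs((by if axis == 1 else bx) - center), x, y, i)
--                 if best is None or key < best[0]:
--                     best = (key, (bx, by))
--     return best[1] if best is not None else None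
-- ===== Notes on version B (the rewrite author's own statement) =====
-- stated objective: faster
-- what changed: B inverts the traversal: instead of scanning every board cell and testing each bridge target for membership in action_set, it iterates directly over action_set, recovers the would-be stone by subtracting each offset, and keeps a single running lexicographic-minimal (tier, dist, x, y, i) key whose uniqueness per (stone, offset) pair reproduces A's group-then-first-min tie-breaking.
import Mathlib
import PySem

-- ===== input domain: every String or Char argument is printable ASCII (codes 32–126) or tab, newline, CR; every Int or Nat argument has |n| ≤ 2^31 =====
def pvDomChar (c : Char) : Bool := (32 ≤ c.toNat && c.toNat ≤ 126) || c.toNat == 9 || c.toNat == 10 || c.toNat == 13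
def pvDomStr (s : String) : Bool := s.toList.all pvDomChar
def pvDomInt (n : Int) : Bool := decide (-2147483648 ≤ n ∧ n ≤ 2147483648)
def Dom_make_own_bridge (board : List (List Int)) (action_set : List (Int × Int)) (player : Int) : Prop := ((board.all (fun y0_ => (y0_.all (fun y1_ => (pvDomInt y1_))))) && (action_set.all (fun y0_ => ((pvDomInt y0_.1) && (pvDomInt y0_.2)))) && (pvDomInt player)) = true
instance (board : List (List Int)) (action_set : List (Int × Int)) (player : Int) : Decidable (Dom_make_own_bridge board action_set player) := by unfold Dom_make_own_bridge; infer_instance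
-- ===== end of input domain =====

set_option maxHeartbeats 1000000

-- B inverts the traversal: it iterates over action_set (not over every board cell), recovers the
-- stone by subtracting each offset, and keeps one running lexicographic-minimal key; objective:
-- faster (O(|action_set|) instead of O(size^2 * |action_set|) board scans).

-- board[i][j] with Python index semantics (negative = from the end); the defaults are unreachable
-- inside Pre_make_own_bridge (where the Python does not raise).  Used by both ports (both Pythons
-- contain the expression board[...][...]).
def pvCell (board : List (List Int)) (i j : Int) : Int :=
  PySem.List.pyGetD (PySem.List.pyGetD board i []) j 99

-- the bridge-validity test both Pythons spell out inline on a stone (x,y) and offset o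
-- (target cell empty, gap inside the board and empty); named once so both ports share its text
def pvCondB (board : List (List Int)) (size x y : Int) (o : Int × Int) : Bool :=
  decide (pvCell board (x + o.1) (y + o.2) = 0 ∧
    0 ≤ x + PySem.Int.floordiv o.1 2 ∧ x + PySem.Int.floordiv o.1 2 < size ∧
    0 ≤ y + PySem.Int.floordiv o.2 2 ∧ y + PySem.Int.floordiv o.2 2 < size ∧
    pvCell board (x + PySem.Int.floordiv o.1 2) (y + PySem.Int.floordiv o.2 2) = 0)

-- A's full if-condition: target in action_set, then the shared validity test
def pvCondA (board : List (List Int)) (action_set : List (Int × Int)) (size x y : Int) (o : Int × Int) : Bool :=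
  decide ((x + o.1, y + o.2) ∈ action_set) && pvCondB board size x y o

-- ===== PORT A =====
-- inner offsets-loop body of A: append the candidate when the bridge is valid
def pvStepA (board : List (List Int)) (action_set : List (Int × Int)) (size x y : Int)
    (acc : List ((Int × Int) × Int × Int)) (o : Int × Int) : List ((Int × Int) × Int × Int) :=
  if pvCondA board action_set size x y o then acc ++ [((x + o.1, y + o.2), o.1, o.2)] else acc

-- key of A's pick_best: distance to the centre line along the winning axis
def pvKey (axis center : Int) (c : (Int × Int) × Int × Int) : Int :=
  |(if axis = 1 then c.1.2 else c.1.1) - center|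

def make_own_bridge (board : List (List Int)) (action_set : List (Int × Int)) (player : Int) : Option (Int × Int) :=
  let size : Int := (board.length : Int)
  let center := PySem.Int.floordiv size 2
  let offsets : List (Int × Int) :=
    if player = 1 then [(1, -2), (-1, 2), (-1, -1), (1, 1)] else [(2, -1), (-2, 1), (-1, -1), (1, 1)]
  let axis : Int := if player = 1 then 1 else 0
  let candidates :=
    (PySem.List.pyRange 0 size 1).foldl (fun acc x =>
      (PySem.List.pyRange 0 size 1).foldl (fun acc y =>
        if pvCell board x y ≠ player then acc
        else offsets.foldl (pvStepA board action_set size x y) acc) acc) []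
  if candidates = [] then none
  else
    let directional := candidates.filter (fun c => 2 < |c.2.1| + |c.2.2|)
    let basic := candidates.filter (fun c => |c.2.1| + |c.2.2| ≤ 2)
    if directional ≠ [] then (PySem.List.min? directional (pvKey axis center)).map (·.1)
    else (PySem.List.min? basic (pvKey axis center)).map (·.1)

-- ===== PORT B =====
-- Python tuple '<' on B's 5-component key, lexicographic
def kLtB (a b : Int × Int × Int × Int × Int) : Bool :=
  decide (a.1 < b.1) || (a.1 == b.1 && (decide (a.2.1 < b.2.1) || (a.2.1 == b.2.1 &&
    (decide (a.2.2.1 < b.2.2.1) || (a.2.2.1 == b.2.2.1 && (decide (a.2.2.2.1 < b.2.2.2.1) ||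
      (a.2.2.2.1 == b.2.2.2.1 && decide (a.2.2.2.2 < b.2.2.2.2))))))))

-- B's scan guard on the recovered stone (x, y)
def pvScanB (board : List (List Int)) (player size x y : Int) : Bool :=
  decide (0 ≤ x ∧ x < size ∧ 0 ≤ y ∧ y < size ∧ pvCell board x y = player)

-- inner enumerate(offsets)-loop body of B: fold the candidate into the single running best
def pvStepB (board : List (List Int)) (player size center axis bx by_ : Int)
    (best : Option ((Int × Int × Int × Int × Int) × (Int × Int))) (io : Int × Int × Int) :
    Option ((Int × Int × Int × Int × Int) × (Int × Int)) :=
  let x := bx - io.2.1; let y := by_ - io.2.2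
  if !(pvScanB board player size x y) then best
  else if pvCondB board size x y io.2 then
    let key : Int × Int × Int × Int × Int :=
      ((if 2 < |io.2.1| + |io.2.2| then 0 else 1),
       |(if axis = 1 then by_ else bx) - center|, x, y, io.1)
    match best with
    | none => some (key, (bx, by_))
    | some b => if kLtB key b.1 then some (key, (bx, by_)) else best
  else best

def make_own_bridge_alt (board : List (List Int)) (action_set : List (Int × Int)) (player : Int) : Option (Int × Int) :=
  let size : Int := (board.length : Int)
  let center := PySem.Int.floordiv size 2
  let offsets : List (Int × Int) :=
    if player = 1 then [(1, -2), (-1, 2), (-1, -1), (1, 1)] else [(2, -1), (-2, 1), (-1, -1), (1, 1)]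
  let axis : Int := if player = 1 then 1 else 0
  let best :=
    action_set.foldl (fun best t =>
      (PySem.List.enumerate offsets).foldl (pvStepB board player size center axis t.1 t.2) best) none
  match best with
  | some b => some b.2
  | none => none

-- ===== PRECONDITION & SPEC =====
-- Pre_ = exactly the inputs where the Python A returns (no IndexError): every row is at least as
-- long as the board (the scan reads board[x][y] for all x,y < size), and every bridge target of an
-- own stone that lies in action_set is a Python-valid (possibly negative) index pair into board.
def Pre_make_own_bridge (board : List (List Int)) (action_set : List (Int × Int)) (player : Int) : Prop :=
  (∀ row ∈ board, board.length ≤ row.length) ∧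
  (∀ x ∈ List.range board.length, ∀ y ∈ List.range board.length,
    (board.getD x []).getD y (player + 1) = player →
    ∀ o ∈ (if player = 1 then [((1 : Int), (-2 : Int)), (-1, 2), (-1, -1), (1, 1)]
           else [((2 : Int), (-1 : Int)), (-2, 1), (-1, -1), (1, 1)]),
      ((x : Int) + o.1, (y : Int) + o.2) ∈ action_set →
      (-(board.length : Int) ≤ (x : Int) + o.1 ∧ (x : Int) + o.1 < (board.length : Int)) ∧
      (-((PySem.List.pyGetD board ((x : Int) + o.1) []).length : Int) ≤ (y : Int) + o.2 ∧
        (y : Int) + o.2 < ((PySem.List.pyGetD board ((x : Int) + o.1) []).length : Int)))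

instance (board : List (List Int)) (action_set : List (Int × Int)) (player : Int) : Decidable (Pre_make_own_bridge board action_set player) := by unfold Pre_make_own_bridge; infer_instance

def pvWitness_make_own_bridge : List (List Int) × (List (Int × Int)) × Int :=
  ([[1, 0], [0, 0]], [(1, 1)], 1)

def Spec_make_own_bridge (board : List (List Int)) (action_set : List (Int × Int)) (player : Int) (out : Option (Int × Int)) : Prop := out = make_own_bridge_alt board action_set player
instance (board : List (List Int)) (action_set : List (Int × Int)) (player : Int) (out : Option (Int × Int)) : Decidable (Spec_make_own_bridge board action_set player out) := by unfold Spec_make_own_bridge; infer_instance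

-- ===== CLAIM (what is proved, stated in full; the proofs are below) =====
def Claim_equal_make_own_bridge : Prop := ∀ (board : List (List Int)) (action_set : List (Int × Int)) (player : Int), Dom_make_own_bridge board action_set player → Pre_make_own_bridge board action_set player → Spec_make_own_bridge board action_set player (make_own_bridge board action_set player)

-- ===== LEMMAS AND PROOFS =====

-- key, entry and candidate shorthands
abbrev pvK : Type := Int × Int × Int × Int × Int
abbrev pvE : Type := pvK × (Int × Int)
abbrev pvC : Type := (Int × Int) × Int × Int

-- the entry B builds for stone (x,y) and indexed offset io
def pvEnt (center axis x y : Int) (io : Int × Int × Int) : pvE :=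
  ((if 2 < |io.2.1| + |io.2.2| then 0 else 1,
    |(if axis = 1 then y + io.2.2 else x + io.2.1) - center|, x, y, io.1),
   (x + io.2.1, y + io.2.2))

-- B's accumulator update on an unconditional entry
def selStep (b : Option pvE) (e : pvE) : Option pvE :=
  match b with
  | none => some e
  | some m => if kLtB e.1 m.1 then some e else some m

-- A's accumulator update: first-wins strict minimum on the (tier, dist) prefix only
def tdLtB (a b : pvK) : Bool := decide (a.1 < b.1) || (a.1 == b.1 && decide (a.2.1 < b.2.1))
def stepTD (b : Option pvE) (e : pvE) : Option pvE :=
  match b with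
  | none => some e
  | some m => if tdLtB e.1 m.1 then some e else some m

-- strict order on the positional (x, y, i) suffix of a key
def pvPosLt (a b : pvE) : Prop :=
  a.1.2.2.1 < b.1.2.2.1 ∨ (a.1.2.2.1 = b.1.2.2.1 ∧
    (a.1.2.2.2.1 < b.1.2.2.2.1 ∨ (a.1.2.2.2.1 = b.1.2.2.2.1 ∧ a.1.2.2.2.2 < b.1.2.2.2.2)))

lemma kLt_irrefl (a : pvK) : kLtB a a = false := by
  obtain ⟨a1, a2, a3, a4, a5⟩ := a
  simp [kLtB]

lemma kLt_trans {a b c : pvK} (h1 : kLtB a b = true) (h2 : kLtB b c = true) : kLtB a c = true := by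
  obtain ⟨a1, a2, a3, a4, a5⟩ := a; obtain ⟨b1, b2, b3, b4, b5⟩ := b; obtain ⟨c1, c2, c3, c4, c5⟩ := c
  simp only [kLtB, Bool.or_eq_true, Bool.and_eq_true, decide_eq_true_eq, beq_iff_eq] at *
  omega

lemma kLt_total {a b : pvK} (h1 : kLtB a b = false) (h2 : kLtB b a = false) : a = b := by
  obtain ⟨a1, a2, a3, a4, a5⟩ := a; obtain ⟨b1, b2, b3, b4, b5⟩ := b
  have h1' : ¬ (kLtB (a1, a2, a3, a4, a5) (b1, b2, b3, b4, b5) = true) := by simp [h1]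
  have h2' : ¬ (kLtB (b1, b2, b3, b4, b5) (a1, a2, a3, a4, a5) = true) := by simp [h2]
  simp only [kLtB, Bool.or_eq_true, Bool.and_eq_true, decide_eq_true_eq, beq_iff_eq] at h1' h2'
  simp only [Prod.mk.injEq]
  omega

lemma td_kLt_trans {a b c : pvK} (h1 : tdLtB a b = true) (h2 : kLtB b c = true) : kLtB a c = true := by
  obtain ⟨a1, a2, a3, a4, a5⟩ := a; obtain ⟨b1, b2, b3, b4, b5⟩ := b; obtain ⟨c1, c2, c3, c4, c5⟩ := c
  simp only [kLtB, tdLtB, Bool.or_eq_true, Bool.and_eq_true, decide_eq_true_eq, beq_iff_eq] at *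
  omega

-- the new element a does not beat the kept accumulator b on (tier,dist); b precedes a positionally;
-- then anything a beats lexicographically, b beats too
lemma td_pos_kLt {a b c : pvE} (h1 : tdLtB a.1 b.1 = false) (hpos : pvPosLt b a)
    (h2 : kLtB a.1 c.1 = true) : kLtB b.1 c.1 = true := by
  obtain ⟨⟨a1, a2, a3, a4, a5⟩, at'⟩ := a; obtain ⟨⟨b1, b2, b3, b4, b5⟩, bt⟩ := b
  obtain ⟨⟨c1, c2, c3, c4, c5⟩, ct⟩ := c
  have h1' : ¬ (tdLtB (a1, a2, a3, a4, a5) (b1, b2, b3, b4, b5) = true) := by simp [h1]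
  simp only [kLtB, tdLtB, pvPosLt, Bool.or_eq_true, Bool.and_eq_true, decide_eq_true_eq,
    beq_iff_eq] at *
  omega

-- ---------- characterization of B's running minimum ----------
lemma selB_go : ∀ (l : List pvE) (m : pvE),
    ∃ r, l.foldl selStep (some m) = some r ∧ r ∈ m :: l ∧ ∀ e ∈ m :: l, kLtB e.1 r.1 = false := by
  intro l
  induction l with
  | nil =>
    intro m
    refine ⟨m, rfl, List.mem_cons_self .., fun e he => ?_⟩
    rw [List.mem_cons] at he
    rcases he with rfl | he
    · exact kLt_irrefl _
    · exact absurd he (List.not_mem_nil)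
  | cons a l ih =>
    intro m
    by_cases h : kLtB a.1 m.1 = true
    · obtain ⟨r, hr, hmem, hmin⟩ := ih a
      have hstep : selStep (some m) a = some a := by simp [selStep, h]
      refine ⟨r, by rw [List.foldl_cons, hstep]; exact hr, ?_, ?_⟩
      · rw [List.mem_cons] at hmem ⊢
        rw [List.mem_cons]
        tauto
      · intro e he
        rw [List.mem_cons] at he
        rcases he with rfl | he
        · cases hkm : kLtB e.1 r.1 with
          | false => rfl
          | true =>
            have h2 := kLt_trans h hkm
            have h3 := hmin a (List.mem_cons_self ..)
            exact absurd (h3 ▸ h2) Bool.false_ne_true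
        · exact hmin e he
    · have h' : kLtB a.1 m.1 = false := by simpa using h
      obtain ⟨r, hr, hmem, hmin⟩ := ih m
      have hstep : selStep (some m) a = some m := by simp [selStep, h']
      refine ⟨r, by rw [List.foldl_cons, hstep]; exact hr, ?_, ?_⟩
      · rw [List.mem_cons] at hmem ⊢
        rw [List.mem_cons]
        tauto
      · intro e he
        rw [List.mem_cons] at he
        rcases he with rfl | he
        · exact hmin e (List.mem_cons_self ..)
        rw [List.mem_cons] at he
        rcases he with rfl | he
        · cases hma : kLtB m.1 e.1 with
          | false =>
            rw [kLt_total h' hma]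
            exact hmin m (List.mem_cons_self ..)
          | true =>
            cases hka : kLtB e.1 r.1 with
            | false => rfl
            | true =>
              have h2 := kLt_trans hma hka
              have h3 := hmin m (List.mem_cons_self ..)
              exact absurd (h3 ▸ h2) Bool.false_ne_true
        · exact hmin e (List.mem_cons_of_mem _ he)

-- ---------- characterization of A's running (tier,dist) minimum on a positionally sorted list ----------
lemma selTD_go : ∀ (l : List pvE) (m : pvE), l.Pairwise pvPosLt → (∀ e ∈ l, pvPosLt m e) →
    ∃ r, l.foldl stepTD (some m) = some r ∧ r ∈ m :: l ∧ ∀ e ∈ m :: l, kLtB e.1 r.1 = false := by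
  intro l
  induction l with
  | nil =>
    intro m _ _
    refine ⟨m, rfl, List.mem_cons_self .., fun e he => ?_⟩
    rw [List.mem_cons] at he
    rcases he with rfl | he
    · exact kLt_irrefl _
    · exact absurd he (List.not_mem_nil)
  | cons a l ih =>
    intro m hpw hm
    have ha : ∀ e ∈ l, pvPosLt a e := (List.pairwise_cons.mp hpw).1
    have hpw' : l.Pairwise pvPosLt := (List.pairwise_cons.mp hpw).2
    by_cases h : tdLtB a.1 m.1 = true
    · obtain ⟨r, hr, hmem, hmin⟩ := ih a hpw' ha
      have hstep : stepTD (some m) a = some a := by simp [stepTD, h]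
      refine ⟨r, by rw [List.foldl_cons, hstep]; exact hr, ?_, ?_⟩
      · rw [List.mem_cons] at hmem ⊢
        rw [List.mem_cons]
        tauto
      · intro e he
        rw [List.mem_cons] at he
        rcases he with rfl | he
        · cases hkm : kLtB e.1 r.1 with
          | false => rfl
          | true =>
            have h2 := td_kLt_trans h hkm
            have h3 := hmin a (List.mem_cons_self ..)
            exact absurd (h3 ▸ h2) Bool.false_ne_true
        · exact hmin e he
    · have h' : tdLtB a.1 m.1 = false := by simpa using h
      obtain ⟨r, hr, hmem, hmin⟩ := ih m hpw' (fun e he => hm e (List.mem_cons_of_mem _ he))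
      have hstep : stepTD (some m) a = some m := by simp [stepTD, h']
      refine ⟨r, by rw [List.foldl_cons, hstep]; exact hr, ?_, ?_⟩
      · rw [List.mem_cons] at hmem ⊢
        rw [List.mem_cons]
        tauto
      · intro e he
        rw [List.mem_cons] at he
        rcases he with rfl | he
        · exact hmin e (List.mem_cons_self ..)
        rw [List.mem_cons] at he
        rcases he with rfl | he
        · cases hka : kLtB e.1 r.1 with
          | false => rfl
          | true =>
            have h2 := td_pos_kLt h' (hm e (List.mem_cons_self ..)) hka
            have h3 := hmin m (List.mem_cons_self ..)
            exact absurd (h3 ▸ h2) Bool.false_ne_true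
        · exact hmin e (List.mem_cons_of_mem _ he)

-- the two running minima agree when the lists have equal members, A's list is positionally
-- sorted, and equal keys force equal entries across the two lists
lemma pvSel_eq (lA lB : List pvE) (hPA : lA.Pairwise pvPosLt)
    (hmem : ∀ e, e ∈ lA ↔ e ∈ lB)
    (hkey : ∀ e e', e ∈ lA → e' ∈ lB → e.1 = e'.1 → e = e') :
    lA.foldl stepTD none = lB.foldl selStep none := by
  cases lA with
  | nil =>
    cases lB with
    | nil => rfl
    | cons b lB' => exact absurd ((hmem b).mpr (List.mem_cons_self ..)) (by simp)
  | cons a lA' =>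
    cases lB with
    | nil => exact absurd ((hmem a).mp (List.mem_cons_self ..)) (by simp)
    | cons b lB' =>
      obtain ⟨r1, hr1, hr1mem, hr1min⟩ :=
        selTD_go lA' a (List.pairwise_cons.mp hPA).2 (List.pairwise_cons.mp hPA).1
      obtain ⟨r2, hr2, hr2mem, hr2min⟩ := selB_go lB' b
      have hA : (a :: lA').foldl stepTD none = some r1 := by
        rw [List.foldl_cons]; exact hr1
      have hB : (b :: lB').foldl selStep none = some r2 := by
        rw [List.foldl_cons]; exact hr2
      rw [hA, hB]
      have h12 : kLtB r1.1 r2.1 = false := hr2min r1 ((hmem r1).mp hr1mem)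
      have h21 : kLtB r2.1 r1.1 = false := hr1min r2 ((hmem r2).mpr hr2mem)
      rw [hkey r1 r2 hr1mem hr2mem (kLt_total h21 h12).symm]

-- ---------- A's staged post-pass as a fold ----------
-- what A's filter/filter/min/min post-pass extracts from a candidate list, as one value
def pvSummary (axis center : Int) (E : List pvC) : Option (Int × Int × (Int × Int)) :=
  match PySem.List.min? (E.filter (fun c => 2 < |c.2.1| + |c.2.2|)) (pvKey axis center) with
  | some m => some (0, pvKey axis center m, m.1)
  | none => (PySem.List.min? (E.filter (fun c => |c.2.1| + |c.2.2| ≤ 2)) (pvKey axis center)).map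
      (fun m => (1, pvKey axis center m, m.1))

def pvUpd (axis center : Int) (best : Option (Int × Int × (Int × Int))) (tier : Int)
    (c : pvC) : Option (Int × Int × (Int × Int)) :=
  match best with
  | none => some (tier, pvKey axis center c, c.1)
  | some b => if tier < b.1 ∨ (tier = b.1 ∧ pvKey axis center c < b.2.1)
      then some (tier, pvKey axis center c, c.1) else some b

def pvStepU (axis center : Int) (s : Option (Int × Int × (Int × Int))) (c : pvC) :
    Option (Int × Int × (Int × Int)) :=
  pvUpd axis center s (if 2 < |c.2.1| + |c.2.2| then 0 else 1) c

lemma pvMin_append (axis center : Int) (L : List pvC) (c : pvC) :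
    PySem.List.min? (L ++ [c]) (pvKey axis center) =
      match PySem.List.min? L (pvKey axis center) with
      | none => some c
      | some m => if pvKey axis center c < pvKey axis center m then some c else some m := by
  cases hL : PySem.List.min? L (pvKey axis center) with
  | none =>
    simp only [PySem.List.min?, List.foldl_append, List.foldl] at hL ⊢
    rw [hL]
  | some m =>
    simp only [PySem.List.min?, List.foldl_append, List.foldl] at hL ⊢
    rw [hL]

lemma pvSummary_append (axis center : Int) (E : List pvC) (c : pvC) :
    pvSummary axis center (E ++ [c]) =
      pvUpd axis center (pvSummary axis center E) (if 2 < |c.2.1| + |c.2.2| then 0 else 1) c := by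
  by_cases hd : 2 < |c.2.1| + |c.2.2|
  · have hd' : ¬ (|c.2.1| + |c.2.2| ≤ 2) := by omega
    simp only [pvSummary, List.filter_append, List.filter_cons, List.filter_nil, hd, hd',
      decide_true, decide_false, if_true, pvMin_append]
    cases hA : PySem.List.min? (E.filter (fun c => 2 < |c.2.1| + |c.2.2|)) (pvKey axis center) <;>
      cases hB : PySem.List.min? (E.filter (fun c => |c.2.1| + |c.2.2| ≤ 2)) (pvKey axis center) <;>
        simp [pvUpd, hB] <;> (try (split_ifs <;> simp_all))
  · have hd' : |c.2.1| + |c.2.2| ≤ 2 := by omega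
    simp only [pvSummary, List.filter_append, List.filter_cons, List.filter_nil, hd, hd',
      decide_true, decide_false, if_true, pvMin_append]
    cases hA : PySem.List.min? (E.filter (fun c => 2 < |c.2.1| + |c.2.2|)) (pvKey axis center) <;>
      cases hB : PySem.List.min? (E.filter (fun c => |c.2.1| + |c.2.2| ≤ 2)) (pvKey axis center) <;>
        simp [pvUpd, hA] <;> (try (split_ifs <;> simp_all))

lemma pvSummary_eq_foldl (axis center : Int) (E : List pvC) :
    pvSummary axis center E = E.foldl (pvStepU axis center) none := by
  induction E using List.reverseRecOn with
  | nil =>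
    have h0 : PySem.List.min? ([] : List pvC) (pvKey axis center) = none :=
      (PySem.List.min?_eq_none_iff _ _).mpr rfl
    simp [pvSummary, h0]
  | append_singleton E c ih =>
    rw [pvSummary_append, List.foldl_append, List.foldl_cons, List.foldl_nil, ih]
    rfl

-- A's post-processing of the final candidate list equals extracting the target from the summary
lemma pvPost (axis center : Int) (E : List pvC) :
    (if E = [] then none
     else
      if E.filter (fun c => 2 < |c.2.1| + |c.2.2|) ≠ [] then
        (PySem.List.min? (E.filter (fun c => 2 < |c.2.1| + |c.2.2|)) (pvKey axis center)).map (·.1)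
      else
        (PySem.List.min? (E.filter (fun c => |c.2.1| + |c.2.2| ≤ 2)) (pvKey axis center)).map (·.1)) =
    match pvSummary axis center E with
    | some b => some b.2.2
    | none => none := by
  rcases E with _ | ⟨c, E'⟩
  · simp [pvSummary, PySem.List.min?]
  · set E := c :: E' with hE
    have hne : E ≠ [] := by simp [hE]
    by_cases hD : E.filter (fun c => 2 < |c.2.1| + |c.2.2|) = []
    · have hmD : PySem.List.min? (E.filter (fun c => 2 < |c.2.1| + |c.2.2|)) (pvKey axis center) = none :=
        (PySem.List.min?_eq_none_iff _ _).mpr hD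
      have hcb : |c.2.1| + |c.2.2| ≤ 2 := by
        by_contra hc
        have hmem : c ∈ E.filter (fun c => 2 < |c.2.1| + |c.2.2|) :=
          List.mem_filter.mpr ⟨by simp [hE], by simp; omega⟩
        rw [hD] at hmem
        exact absurd hmem (List.not_mem_nil)
      have hB : E.filter (fun c => |c.2.1| + |c.2.2| ≤ 2) ≠ [] := by
        have hmem : c ∈ E.filter (fun c => |c.2.1| + |c.2.2| ≤ 2) :=
          List.mem_filter.mpr ⟨by simp [hE], by simpa using hcb⟩
        intro hcon; rw [hcon] at hmem; exact absurd hmem (List.not_mem_nil)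
      have hBne : PySem.List.min? (E.filter (fun c => |c.2.1| + |c.2.2| ≤ 2)) (pvKey axis center) ≠ none :=
        fun hcon => hB ((PySem.List.min?_eq_none_iff _ _).mp hcon)
      rcases Option.ne_none_iff_exists'.mp hBne with ⟨m, hm⟩
      have hnil : PySem.List.min? ([] : List pvC) (pvKey axis center) = none :=
        (PySem.List.min?_eq_none_iff _ _).mpr rfl
      simp [hne, hD, pvSummary, hnil, hm]
    · have hDne : PySem.List.min? (E.filter (fun c => 2 < |c.2.1| + |c.2.2|)) (pvKey axis center) ≠ none :=
        fun hcon => hD ((PySem.List.min?_eq_none_iff _ _).mp hcon)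
      rcases Option.ne_none_iff_exists'.mp hDne with ⟨m, hm⟩
      simp [hne, hD, pvSummary, hm]

-- ---------- transporting A's fold onto entries ----------
def pvRel (axis center : Int) (c : pvC) (e : pvE) : Prop :=
  e.1.1 = (if 2 < |c.2.1| + |c.2.2| then (0 : Int) else 1) ∧ e.1.2.1 = pvKey axis center c ∧ e.2 = c.1

def pvSRel (s : Option (Int × Int × (Int × Int))) (s' : Option pvE) : Prop :=
  match s, s' with
  | none, none => True
  | some b, some e => b = (e.1.1, e.1.2.1, e.2)
  | _, _ => False

lemma pvStepU_rel (axis center : Int) {c : pvC} {e : pvE} (hce : pvRel axis center c e)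
    {s : Option (Int × Int × (Int × Int))} {s' : Option pvE} (hs : pvSRel s s') :
    pvSRel (pvStepU axis center s c) (stepTD s' e) := by
  obtain ⟨h1, h2, h3⟩ := hce
  cases s with
  | none =>
    cases s' with
    | none =>
      show pvSRel (some _) (some e)
      show ((if 2 < |c.2.1| + |c.2.2| then (0 : Int) else 1), pvKey axis center c, c.1) = (e.1.1, e.1.2.1, e.2)
      rw [h1, h2, h3]
    | some e' => exact absurd hs (by simp [pvSRel])
  | some b =>
    cases s' with
    | none => exact absurd hs (by simp [pvSRel])
    | some m =>
      have hb : b = (m.1.1, m.1.2.1, m.2) := hs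
      subst hb
      by_cases hc : tdLtB e.1 m.1 = true
      · have hcp : (if 2 < |c.2.1| + |c.2.2| then (0 : Int) else 1) < m.1.1 ∨
            ((if 2 < |c.2.1| + |c.2.2| then (0 : Int) else 1) = m.1.1 ∧ pvKey axis center c < m.1.2.1) := by
          rw [← h1, ← h2]
          simpa only [tdLtB, Bool.or_eq_true, Bool.and_eq_true, decide_eq_true_eq, beq_iff_eq] using hc
        have hA : pvStepU axis center (some (m.1.1, m.1.2.1, m.2)) c =
            some ((if 2 < |c.2.1| + |c.2.2| then (0 : Int) else 1), pvKey axis center c, c.1) := by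
          simp only [pvStepU, pvUpd, if_pos hcp]
        have hB : stepTD (some m) e = some e := by simp [stepTD, hc]
        rw [hA, hB]
        show ((if 2 < |c.2.1| + |c.2.2| then (0 : Int) else 1), pvKey axis center c, c.1) = (e.1.1, e.1.2.1, e.2)
        rw [h1, h2, h3]
      · have hc' : tdLtB e.1 m.1 = false := by simpa using hc
        have hcp : ¬ ((if 2 < |c.2.1| + |c.2.2| then (0 : Int) else 1) < m.1.1 ∨
            ((if 2 < |c.2.1| + |c.2.2| then (0 : Int) else 1) = m.1.1 ∧ pvKey axis center c < m.1.2.1)) := by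
          rw [← h1, ← h2]
          intro hcon
          exact hc (by simpa only [tdLtB, Bool.or_eq_true, Bool.and_eq_true, decide_eq_true_eq, beq_iff_eq] using hcon)
        have hA : pvStepU axis center (some (m.1.1, m.1.2.1, m.2)) c = some (m.1.1, m.1.2.1, m.2) := by
          simp only [pvStepU, pvUpd, if_neg hcp]
        have hB : stepTD (some m) e = some m := by simp [stepTD, hc']
        rw [hA, hB]
        rfl

lemma pvFold_rel (axis center : Int) : ∀ {l : List pvC} {l' : List pvE},
    List.Forall₂ (pvRel axis center) l l' →
    ∀ {s : Option (Int × Int × (Int × Int))} {s' : Option pvE}, pvSRel s s' →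
    pvSRel (l.foldl (pvStepU axis center) s) (l'.foldl stepTD s') := by
  intro l l' h
  induction h with
  | nil => intro s s' hs; exact hs
  | cons hce _ ih => intro s s' hs; exact ih (pvStepU_rel axis center hce hs)

-- ---------- the lists the two scans generate ----------
def pvLA (board : List (List Int)) (action_set : List (Int × Int)) (player size center axis : Int)
    (offs : List (Int × Int)) : List pvE :=
  (PySem.List.pyRange 0 size 1).flatMap (fun x =>
    (PySem.List.pyRange 0 size 1).flatMap (fun y =>
      if pvCell board x y = player then
        (PySem.List.enumerate offs).flatMap (fun io =>
          if pvCondA board action_set size x y io.2 then [pvEnt center axis x y io] else [])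
      else []))

def pvLB (board : List (List Int)) (action_set : List (Int × Int)) (player size center axis : Int)
    (offs : List (Int × Int)) : List pvE :=
  action_set.flatMap (fun t =>
    (PySem.List.enumerate offs).flatMap (fun io =>
      if pvScanB board player size (t.1 - io.2.1) (t.2 - io.2.2) &&
          pvCondB board size (t.1 - io.2.1) (t.2 - io.2.2) io.2
      then [pvEnt center axis (t.1 - io.2.1) (t.2 - io.2.2) io] else []))

-- A's candidate loop, rewritten as the flatMap it builds
lemma pvCandA_eq (board : List (List Int)) (action_set : List (Int × Int)) (player size : Int)
    (offs : List (Int × Int)) :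
    (PySem.List.pyRange 0 size 1).foldl (fun acc x =>
      (PySem.List.pyRange 0 size 1).foldl (fun acc y =>
        if pvCell board x y ≠ player then acc
        else offs.foldl (pvStepA board action_set size x y) acc) acc) [] =
    (PySem.List.pyRange 0 size 1).flatMap (fun x =>
      (PySem.List.pyRange 0 size 1).flatMap (fun y =>
        if pvCell board x y = player then
          offs.flatMap (fun o =>
            if pvCondA board action_set size x y o then [((x + o.1, y + o.2), o.1, o.2)] else [])
        else [])) := by
  have hinner : ∀ x y acc, offs.foldl (pvStepA board action_set size x y) acc =
      acc ++ offs.flatMap (fun o =>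
        if pvCondA board action_set size x y o then [((x + o.1, y + o.2), o.1, o.2)] else []) := by
    intro x y acc
    have hf : pvStepA board action_set size x y = fun acc o =>
        acc ++ (if pvCondA board action_set size x y o then [((x + o.1, y + o.2), o.1, o.2)] else []) := by
      funext acc o
      simp only [pvStepA]
      split_ifs <;> simp
    rw [hf, PySem.List.foldl_append_eq_flatMap]
  have hmid : ∀ x acc, (PySem.List.pyRange 0 size 1).foldl (fun acc y =>
      if pvCell board x y ≠ player then acc
      else offs.foldl (pvStepA board action_set size x y) acc) acc =
      acc ++ (PySem.List.pyRange 0 size 1).flatMap (fun y =>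
        if pvCell board x y = player then
          offs.flatMap (fun o =>
            if pvCondA board action_set size x y o then [((x + o.1, y + o.2), o.1, o.2)] else [])
        else []) := by
    intro x acc
    have hf : (fun acc y => if pvCell board x y ≠ player then acc
        else offs.foldl (pvStepA board action_set size x y) acc) = fun (acc : List pvC) y =>
        acc ++ (if pvCell board x y = player then
          offs.flatMap (fun o =>
            if pvCondA board action_set size x y o then [((x + o.1, y + o.2), o.1, o.2)] else [])
        else []) := by
      funext acc y
      by_cases h : pvCell board x y = player
      · simp [h, hinner]
      · simp [h]
    rw [hf, PySem.List.foldl_append_eq_flatMap]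
  have hf : (fun acc x => (PySem.List.pyRange 0 size 1).foldl (fun acc y =>
      if pvCell board x y ≠ player then acc
      else offs.foldl (pvStepA board action_set size x y) acc) acc) = fun (acc : List pvC) x =>
      acc ++ (PySem.List.pyRange 0 size 1).flatMap (fun y =>
        if pvCell board x y = player then
          offs.flatMap (fun o =>
            if pvCondA board action_set size x y o then [((x + o.1, y + o.2), o.1, o.2)] else [])
        else []) := by
    funext acc x
    exact hmid x acc
  rw [hf, PySem.List.foldl_append_eq_flatMap]
  simp

-- Forall₂ between A's candidate chunks and the entry chunks
lemma pvForall2_flatMap {α β γ : Type} {R : β → γ → Prop} (l : List α) (f : α → List β) (g : α → List γ)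
    (h : ∀ a ∈ l, List.Forall₂ R (f a) (g a)) : List.Forall₂ R (l.flatMap f) (l.flatMap g) := by
  induction l with
  | nil => simp
  | cons a l ih =>
    simp only [List.flatMap_cons]
    exact List.rel_append (h a (List.mem_cons_self ..)) (ih (fun a ha => h a (List.mem_cons_of_mem _ ha)))

lemma pvChunk_rel (board : List (List Int)) (action_set : List (Int × Int)) (size center axis x y : Int) :
    ∀ (offs : List (Int × Int)) (s : Int),
    List.Forall₂ (pvRel axis center)
      (offs.flatMap (fun o =>
        if pvCondA board action_set size x y o then [((x + o.1, y + o.2), o.1, o.2)] else []))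
      ((PySem.List.enumerate offs s).flatMap (fun io =>
        if pvCondA board action_set size x y io.2 then [pvEnt center axis x y io] else [])) := by
  intro offs
  induction offs with
  | nil => intro s; simp [PySem.List.enumerate]
  | cons o offs ih =>
    intro s
    rw [PySem.List.enumerate_cons]
    simp only [List.flatMap_cons]
    refine List.rel_append ?_ (ih (s + 1))
    by_cases h : pvCondA board action_set size x y o = true
    · rw [if_pos h, if_pos h]
      refine List.Forall₂.cons ?_ List.Forall₂.nil
      unfold pvRel
      exact ⟨rfl, rfl, rfl⟩
    · rw [if_neg h, if_neg h]
      exact List.Forall₂.nil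

lemma pvLA_rel (board : List (List Int)) (action_set : List (Int × Int)) (player size center axis : Int)
    (offs : List (Int × Int)) :
    List.Forall₂ (pvRel axis center)
      ((PySem.List.pyRange 0 size 1).flatMap (fun x =>
        (PySem.List.pyRange 0 size 1).flatMap (fun y =>
          if pvCell board x y = player then
            offs.flatMap (fun o =>
              if pvCondA board action_set size x y o then [((x + o.1, y + o.2), o.1, o.2)] else [])
          else [])))
      (pvLA board action_set player size center axis offs) := by
  refine pvForall2_flatMap _ _ _ (fun x _ => ?_)
  refine pvForall2_flatMap _ _ _ (fun y _ => ?_)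
  by_cases h : pvCell board x y = player
  · rw [if_pos h, if_pos h]
    exact pvChunk_rel board action_set size center axis x y offs 0
  · rw [if_neg h, if_neg h]
    exact List.Forall₂.nil

-- ---------- membership in the two entry lists ----------
lemma pvMem_lA (board : List (List Int)) (action_set : List (Int × Int)) (player size center axis : Int)
    (offs : List (Int × Int)) (e : pvE) :
    e ∈ pvLA board action_set player size center axis offs ↔
      ∃ x y io, io ∈ PySem.List.enumerate offs ∧ pvScanB board player size x y = true ∧
        pvCondA board action_set size x y io.2 = true ∧ e = pvEnt center axis x y io := by
  simp only [pvLA, List.mem_flatMap, PySem.List.mem_pyRange_one]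
  constructor
  · rintro ⟨x, hx, y, hy, he⟩
    by_cases h : pvCell board x y = player
    · rw [if_pos h] at he
      simp only [List.mem_flatMap] at he
      obtain ⟨io, hio, he⟩ := he
      by_cases hc : pvCondA board action_set size x y io.2 = true
      · rw [if_pos hc] at he
        simp only [List.mem_singleton] at he
        refine ⟨x, y, io, hio, ?_, hc, he⟩
        simp only [pvScanB, decide_eq_true_eq]
        exact ⟨hx.1, hx.2, hy.1, hy.2, h⟩
      · rw [if_neg hc] at he; exact absurd he (List.not_mem_nil)
    · rw [if_neg h] at he; exact absurd he (List.not_mem_nil)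
  · rintro ⟨x, y, io, hio, hscan, hc, he⟩
    simp only [pvScanB, decide_eq_true_eq] at hscan
    obtain ⟨hx0, hx1, hy0, hy1, h⟩ := hscan
    refine ⟨x, ⟨hx0, hx1⟩, y, ⟨hy0, hy1⟩, ?_⟩
    rw [if_pos h]
    simp only [List.mem_flatMap]
    exact ⟨io, hio, by rw [if_pos hc]; simp [he]⟩

lemma pvMem_lB (board : List (List Int)) (action_set : List (Int × Int)) (player size center axis : Int)
    (offs : List (Int × Int)) (e : pvE) :
    e ∈ pvLB board action_set player size center axis offs ↔
      ∃ x y io, io ∈ PySem.List.enumerate offs ∧ pvScanB board player size x y = true ∧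
        pvCondA board action_set size x y io.2 = true ∧ e = pvEnt center axis x y io := by
  simp only [pvLB, List.mem_flatMap]
  constructor
  · rintro ⟨t, ht, io, hio, he⟩
    by_cases hc : (pvScanB board player size (t.1 - io.2.1) (t.2 - io.2.2) &&
        pvCondB board size (t.1 - io.2.1) (t.2 - io.2.2) io.2) = true
    · rw [if_pos hc] at he
      simp only [List.mem_singleton] at he
      rw [Bool.and_eq_true] at hc
      refine ⟨t.1 - io.2.1, t.2 - io.2.2, io, hio, hc.1, ?_, he⟩
      rw [pvCondA, Bool.and_eq_true, decide_eq_true_eq]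
      have h1 : t.1 - io.2.1 + io.2.1 = t.1 := by ring
      have h2 : t.2 - io.2.2 + io.2.2 = t.2 := by ring
      rw [h1, h2]
      exact ⟨ht, hc.2⟩
    · rw [if_neg hc] at he; exact absurd he (List.not_mem_nil)
  · rintro ⟨x, y, io, hio, hscan, hc, he⟩
    rw [pvCondA, Bool.and_eq_true, decide_eq_true_eq] at hc
    obtain ⟨hmem, hcB⟩ := hc
    refine ⟨(x + io.2.1, y + io.2.2), hmem, io, hio, ?_⟩
    have h1 : x + io.2.1 - io.2.1 = x := by ring
    have h2 : y + io.2.2 - io.2.2 = y := by ring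
    rw [h1, h2, if_pos (by rw [Bool.and_eq_true]; exact ⟨hscan, hcB⟩)]
    simp [he]

-- equal keys across the two lists force equal entries
lemma pvKey_inj (board : List (List Int)) (action_set : List (Int × Int)) (player size center axis : Int)
    (offs : List (Int × Int)) (e e' : pvE)
    (he : e ∈ pvLA board action_set player size center axis offs)
    (he' : e' ∈ pvLB board action_set player size center axis offs)
    (hk : e.1 = e'.1) : e = e' := by
  obtain ⟨x, y, io, hio, -, -, rfl⟩ := (pvMem_lA board action_set player size center axis offs e).mp he
  obtain ⟨x', y', io', hio', -, -, rfl⟩ := (pvMem_lB board action_set player size center axis offs e').mp he'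
  obtain ⟨k, hkl, rfl⟩ := (PySem.List.mem_enumerate_iff offs 0 io).mp hio
  obtain ⟨k', hkl', rfl⟩ := (PySem.List.mem_enumerate_iff offs 0 io').mp hio'
  simp only [pvEnt, Prod.mk.injEq] at hk
  obtain ⟨-, -, hx, hy, hi⟩ := hk
  have hkk : k = k' := by omega
  subst hkk
  subst hx
  subst hy
  rfl

-- positional sortedness of A's entry list
lemma pvLA_pairwise (board : List (List Int)) (action_set : List (Int × Int)) (player size center axis : Int)
    (offs : List (Int × Int)) :
    (pvLA board action_set player size center axis offs).Pairwise pvPosLt := by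
  rw [pvLA, List.pairwise_flatMap]
  constructor
  · intro x _
    rw [List.pairwise_flatMap]
    constructor
    · intro y _
      by_cases h : pvCell board x y = player
      · rw [if_pos h, List.pairwise_flatMap]
        constructor
        · intro io _
          by_cases hc : pvCondA board action_set size x y io.2 = true
          · rw [if_pos hc]; simp
          · rw [if_neg hc]; simp
        · refine (PySem.List.pairwise_lt_enumerate offs 0).imp_of_mem (fun {io io'} hio hio' hlt => ?_)
          intro a ha b hb
          have ha' : a = pvEnt center axis x y io := by
            by_cases hc : pvCondA board action_set size x y io.2 = true
            · rw [if_pos hc] at ha; simpa using ha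
            · rw [if_neg hc] at ha; exact absurd ha (List.not_mem_nil)
          have hb' : b = pvEnt center axis x y io' := by
            by_cases hc : pvCondA board action_set size x y io'.2 = true
            · rw [if_pos hc] at hb; simpa using hb
            · rw [if_neg hc] at hb; exact absurd hb (List.not_mem_nil)
          subst ha'
          subst hb'
          unfold pvPosLt pvEnt
          exact Or.inr ⟨rfl, Or.inr ⟨rfl, hlt⟩⟩
      · rw [if_neg h]; simp
    · refine (PySem.List.pairwise_lt_pyRange_one 0 size).imp_of_mem (fun {y y'} hy hy' hlt => ?_)
      intro a ha b hb
      obtain ⟨io, rfl⟩ : ∃ io, a = pvEnt center axis x y io := by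
        by_cases h : pvCell board x y = player
        · rw [if_pos h] at ha
          simp only [List.mem_flatMap] at ha
          obtain ⟨io, _, ha⟩ := ha
          by_cases hc : pvCondA board action_set size x y io.2 = true
          · rw [if_pos hc] at ha
            exact ⟨io, by simpa using ha⟩
          · rw [if_neg hc] at ha; exact absurd ha (List.not_mem_nil)
        · rw [if_neg h] at ha; exact absurd ha (List.not_mem_nil)
      obtain ⟨io', rfl⟩ : ∃ io, b = pvEnt center axis x y' io := by
        by_cases h : pvCell board x y' = player
        · rw [if_pos h] at hb
          simp only [List.mem_flatMap] at hb
          obtain ⟨io, _, hb⟩ := hb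
          by_cases hc : pvCondA board action_set size x y' io.2 = true
          · rw [if_pos hc] at hb
            exact ⟨io, by simpa using hb⟩
          · rw [if_neg hc] at hb; exact absurd hb (List.not_mem_nil)
        · rw [if_neg h] at hb; exact absurd hb (List.not_mem_nil)
      unfold pvPosLt pvEnt
      exact Or.inr ⟨rfl, Or.inl hlt⟩
  · refine (PySem.List.pairwise_lt_pyRange_one 0 size).imp_of_mem (fun {x x'} hx hx' hlt => ?_)
    intro a ha b hb
    obtain ⟨y, io, rfl⟩ : ∃ y io, a = pvEnt center axis x y io := by
      simp only [List.mem_flatMap] at ha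
      obtain ⟨y, _, ha⟩ := ha
      by_cases h : pvCell board x y = player
      · rw [if_pos h] at ha
        simp only [List.mem_flatMap] at ha
        obtain ⟨io, _, ha⟩ := ha
        by_cases hc : pvCondA board action_set size x y io.2 = true
        · rw [if_pos hc] at ha
          exact ⟨y, io, by simpa using ha⟩
        · rw [if_neg hc] at ha; exact absurd ha (List.not_mem_nil)
      · rw [if_neg h] at ha; exact absurd ha (List.not_mem_nil)
    obtain ⟨y', io', rfl⟩ : ∃ y io, b = pvEnt center axis x' y io := by
      simp only [List.mem_flatMap] at hb
      obtain ⟨y, _, hb⟩ := hb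
      by_cases h : pvCell board x' y = player
      · rw [if_pos h] at hb
        simp only [List.mem_flatMap] at hb
        obtain ⟨io, _, hb⟩ := hb
        by_cases hc : pvCondA board action_set size x' y io.2 = true
        · rw [if_pos hc] at hb
          exact ⟨y, io, by simpa using hb⟩
        · rw [if_neg hc] at hb; exact absurd hb (List.not_mem_nil)
      · rw [if_neg h] at hb; exact absurd hb (List.not_mem_nil)
    unfold pvPosLt pvEnt
    exact Or.inl hlt

-- ---------- B's loops compute the running minimum over pvLB ----------
lemma pvFoldl_guard {α : Type} (P : α → Bool) (f : α → pvE) :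
    ∀ (l : List α) (s : Option pvE),
    l.foldl (fun b a => if P a then selStep b (f a) else b) s =
      (l.flatMap (fun a => if P a then [f a] else [])).foldl selStep s := by
  intro l
  induction l with
  | nil => intro s; rfl
  | cons a l ih =>
    intro s
    simp only [List.foldl_cons, List.flatMap_cons, List.foldl_append]
    by_cases h : P a = true
    · rw [if_pos h, if_pos h, ih]
      rfl
    · rw [if_neg h, if_neg h, ih]
      rfl

lemma pvFoldl_flatMap {α : Type} (g : α → List pvE) :
    ∀ (l : List α) (s : Option pvE),
    l.foldl (fun b a => (g a).foldl selStep b) s = (l.flatMap g).foldl selStep s := by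
  intro l
  induction l with
  | nil => intro s; rfl
  | cons a l ih =>
    intro s
    simp only [List.foldl_cons, List.flatMap_cons, List.foldl_append]
    exact ih _

lemma pvStepB_eq (board : List (List Int)) (player size center axis bx by_ : Int)
    (best : Option pvE) (io : Int × Int × Int) :
    pvStepB board player size center axis bx by_ best io =
      if (pvScanB board player size (bx - io.2.1) (by_ - io.2.2) &&
          pvCondB board size (bx - io.2.1) (by_ - io.2.2) io.2)
      then selStep best (pvEnt center axis (bx - io.2.1) (by_ - io.2.2) io) else best := by
  have h1 : bx - io.2.1 + io.2.1 = bx := by ring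
  have h2 : by_ - io.2.2 + io.2.2 = by_ := by ring
  by_cases hs : pvScanB board player size (bx - io.2.1) (by_ - io.2.2) = true
  · by_cases hc : pvCondB board size (bx - io.2.1) (by_ - io.2.2) io.2 = true
    · cases best with
      | none => simp [pvStepB, pvEnt, selStep, hs, hc, h1, h2]
      | some b => simp [pvStepB, pvEnt, selStep, hs, hc, h1, h2]
    · simp [pvStepB, hs, hc]
  · simp [pvStepB, hs]

lemma pvB_fold (board : List (List Int)) (action_set : List (Int × Int)) (player size center axis : Int)
    (offs : List (Int × Int)) :
    action_set.foldl (fun best t =>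
      (PySem.List.enumerate offs).foldl (pvStepB board player size center axis t.1 t.2) best) none =
    (pvLB board action_set player size center axis offs).foldl selStep none := by
  rw [pvLB, ← pvFoldl_flatMap]
  congr 1
  funext best t
  have hf : pvStepB board player size center axis t.1 t.2 = fun b io =>
      if (pvScanB board player size (t.1 - io.2.1) (t.2 - io.2.2) &&
          pvCondB board size (t.1 - io.2.1) (t.2 - io.2.2) io.2)
      then selStep b (pvEnt center axis (t.1 - io.2.1) (t.2 - io.2.2) io) else b := by
    funext b io
    exact pvStepB_eq board player size center axis t.1 t.2 b io
  rw [hf]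
  exact pvFoldl_guard _ _ _ best

-- ---------- assembling one player case ----------
lemma pvMaster (board : List (List Int)) (action_set : List (Int × Int)) (player size center axis : Int)
    (offs : List (Int × Int)) :
    (if ((PySem.List.pyRange 0 size 1).foldl (fun acc x =>
          (PySem.List.pyRange 0 size 1).foldl (fun acc y =>
            if pvCell board x y ≠ player then acc
            else offs.foldl (pvStepA board action_set size x y) acc) acc) []) = [] then none
     else
      if (((PySem.List.pyRange 0 size 1).foldl (fun acc x =>
          (PySem.List.pyRange 0 size 1).foldl (fun acc y =>
            if pvCell board x y ≠ player then acc
            else offs.foldl (pvStepA board action_set size x y) acc) acc) []).filter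
            (fun c => 2 < |c.2.1| + |c.2.2|)) ≠ [] then
        (PySem.List.min? (((PySem.List.pyRange 0 size 1).foldl (fun acc x =>
          (PySem.List.pyRange 0 size 1).foldl (fun acc y =>
            if pvCell board x y ≠ player then acc
            else offs.foldl (pvStepA board action_set size x y) acc) acc) []).filter
            (fun c => 2 < |c.2.1| + |c.2.2|)) (pvKey axis center)).map (·.1)
      else
        (PySem.List.min? (((PySem.List.pyRange 0 size 1).foldl (fun acc x =>
          (PySem.List.pyRange 0 size 1).foldl (fun acc y =>
            if pvCell board x y ≠ player then acc
            else offs.foldl (pvStepA board action_set size x y) acc) acc) []).filter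
            (fun c => |c.2.1| + |c.2.2| ≤ 2)) (pvKey axis center)).map (·.1)) =
    (match action_set.foldl (fun best t =>
        (PySem.List.enumerate offs).foldl (pvStepB board player size center axis t.1 t.2) best) none with
      | some b => some b.2
      | none => none) := by
  rw [pvPost axis center, pvSummary_eq_foldl, pvCandA_eq, pvB_fold]
  have hfold := pvFold_rel axis center
    (pvLA_rel board action_set player size center axis offs)
    (s := none) (s' := none) (by simp [pvSRel])
  have hsel := pvSel_eq
    (pvLA board action_set player size center axis offs)
    (pvLB board action_set player size center axis offs)
    (pvLA_pairwise board action_set player size center axis offs)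
    (fun e => by
      rw [pvMem_lA board action_set player size center axis offs e,
        pvMem_lB board action_set player size center axis offs e])
    (pvKey_inj board action_set player size center axis offs)
  rw [hsel] at hfold
  cases hA : ((PySem.List.pyRange 0 size 1).flatMap (fun x =>
      (PySem.List.pyRange 0 size 1).flatMap (fun y =>
        if pvCell board x y = player then
          offs.flatMap (fun o =>
            if pvCondA board action_set size x y o then [((x + o.1, y + o.2), o.1, o.2)] else [])
        else []))).foldl (pvStepU axis center) none with
  | none =>
    rw [hA] at hfold
    cases hB : (pvLB board action_set player size center axis offs).foldl selStep none with
    | none => rfl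
    | some e => rw [hB] at hfold; exact absurd hfold (by simp [pvSRel])
  | some b =>
    rw [hA] at hfold
    cases hB : (pvLB board action_set player size center axis offs).foldl selStep none with
    | none => rw [hB] at hfold; exact absurd hfold (by simp [pvSRel])
    | some e =>
      rw [hB] at hfold
      have hb : b = (e.1.1, e.1.2.1, e.2) := hfold
      rw [hb]

-- ===== VERDICT (by name: the statement is the Claim_ definition above) =====
theorem make_own_bridge_spec : Claim_equal_make_own_bridge := by
  intro board action_set player _ _
  unfold Spec_make_own_bridge make_own_bridge make_own_bridge_alt
  by_cases hp : player = 1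
  · simp only [if_pos hp]
    exact pvMaster board action_set player (board.length : Int)
      (PySem.Int.floordiv (board.length : Int) 2) 1 [(1, -2), (-1, 2), (-1, -1), (1, 1)]
  · simp only [if_neg hp]
    exact pvMaster board action_set player (board.length : Int)
      (PySem.Int.floordiv (board.length : Int) 2) 0 [(2, -1), (-2, 1), (-1, -1), (1, 1)]
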